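-- pv_equiv track=rewrite | github.com/jy1559/FeaturedMoE | experiments/run/baseline/run_widesearch_anchor_core.py | _profile_dir_name
-- ===== SOURCE A (Python) =====
-- def _sanitize_token(text: str, *, upper: bool = True) -> str:
--     out = []
--     for ch in str(text or ""):
--         if ch.isalnum():
--             out.append(ch.upper() if upper else ch.lower())
--         else:
--             out.append("_")
--     token = "".join(out)
--     while "__" in token:
--         token = token.replace("__", "_")
--     return token.strip("_") or "X"
--
-- def _profile_dir_name(profile_id: str) -> str:
--     pid = str(profile_id or "").strip()
--     if pid.upper().startswith("LR"):
--         out = []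
--         for ch in pid:
--             out.append(ch if ch.isalnum() else "_")
--         token = "".join(out)
--         while "__" in token:
--             token = token.replace("__", "_")
--         return token.strip("_") or "LR"
--     return _sanitize_token(pid, upper=True)
-- ===== SOURCE B (Python) =====
-- def _profile_dir_name(profile_id: str) -> str:
--     pid = str(profile_id or "").strip()
--     is_lr = pid.upper().startswith("LR")
--     words = []
--     cur = []
--     for ch in pid:
--         if ch.isalnum():
--             cur.append(ch if is_lr else ch.upper())
--         elif cur:
--             words.append("".join(cur))
--             cur = []
--     if cur:
--         words.append("".join(cur))
--     return "_".join(words) or ("LR" if is_lr else "X")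
-- ===== Notes on version B (the rewrite author's own statement) =====
-- stated objective: simpler
-- what changed: B tokenizes the stripped id into maximal alphanumeric runs in a single pass and joins the runs with a separator, replacing A's char-by-char mapping followed by a repeated pairwise-collapse while-loop and an edge-strip.
import Mathlib
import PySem

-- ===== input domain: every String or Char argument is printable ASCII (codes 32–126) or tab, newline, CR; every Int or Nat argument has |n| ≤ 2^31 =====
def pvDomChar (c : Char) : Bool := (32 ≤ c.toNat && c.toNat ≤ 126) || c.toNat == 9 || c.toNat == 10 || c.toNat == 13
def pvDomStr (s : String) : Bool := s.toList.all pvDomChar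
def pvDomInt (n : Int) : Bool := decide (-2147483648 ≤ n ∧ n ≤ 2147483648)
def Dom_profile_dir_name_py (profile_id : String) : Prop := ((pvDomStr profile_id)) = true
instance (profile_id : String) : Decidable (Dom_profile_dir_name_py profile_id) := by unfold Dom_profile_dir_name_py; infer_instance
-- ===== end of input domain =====

-- B replaces A's map-to-'_' + repeated replace("__","_") collapse loop + strip("_") by a single
-- tokenize-and-join pass over the stripped id (simpler decomposition; equal return values proved).

-- ===== PORT A =====
-- the 'while "__" in token: token = token.replace("__","_")' loop; fuel = token length
-- (a pass with "__" present strictly shortens the token, so token.length passes suffice — proved below)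
def pvCollapseLoop (fuel : Nat) (t : List Char) : List Char :=
  match fuel with
  | 0 => t
  | n+1 => if PySem.Chars.isIn ['_', '_'] t then pvCollapseLoop n (PySem.Chars.replace t ['_', '_'] ['_']) else t

def pvSanitizeToken (text : String) (upper : Bool) : String :=
  let out := text.toList.foldl (fun acc ch => acc ++ [if PySem.Chars.isalnum ch then (if upper then PySem.Chars.upperChar ch else PySem.Chars.lowerChar ch) else '_']) ([] : List Char)
  let token := pvCollapseLoop out.length out
  let res := PySem.Chars.stripChars token ['_']
  if res.isEmpty then "X" else String.ofList res

def profile_dir_name_py (profile_id : String) : String :=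
  let pid := PySem.Str.strip profile_id
  if PySem.Str.startswith (PySem.Str.upper pid) "LR" then
    let out := pid.toList.foldl (fun acc ch => acc ++ [if PySem.Chars.isalnum ch then ch else '_']) ([] : List Char)
    let token := pvCollapseLoop out.length out
    let res := PySem.Chars.stripChars token ['_']
    if res.isEmpty then "LR" else String.ofList res
  else pvSanitizeToken pid true

-- ===== PORT B =====
-- one pass: grow the current maximal alnum run in s.2, flush finished runs into s.1
def pvStep (isLR : Bool) (s : List (List Char) × List Char) (ch : Char) : List (List Char) × List Char :=
  if PySem.Chars.isalnum ch then (s.1, s.2 ++ [if isLR then ch else PySem.Chars.upperChar ch])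
  else if s.2.isEmpty then s
  else (s.1 ++ [s.2], [])

def profile_dir_name_py_alt (profile_id : String) : String :=
  let pid := PySem.Str.strip profile_id
  let isLR := PySem.Str.startswith (PySem.Str.upper pid) "LR"
  let s := pid.toList.foldl (pvStep isLR) (([] : List (List Char)), ([] : List Char))
  let words := if s.2.isEmpty then s.1 else s.1 ++ [s.2]
  let res := PySem.Chars.join ['_'] words
  if res.isEmpty then (if isLR then "LR" else "X") else String.ofList res

-- ===== PRECONDITION & SPEC =====
def Spec_profile_dir_name_py (profile_id : String) (out : String) : Prop := out = profile_dir_name_py_alt profile_id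
instance (profile_id : String) (out : String) : Decidable (Spec_profile_dir_name_py profile_id out) := by unfold Spec_profile_dir_name_py; infer_instance

-- ===== CLAIM (what is proved, stated in full; the proofs are below) =====
def Claim_equal_profile_dir_name_py : Prop := ∀ (profile_id : String), Dom_profile_dir_name_py profile_id → Spec_profile_dir_name_py profile_id (profile_dir_name_py profile_id)

-- ===== LEMMAS AND PROOFS =====

-- one replace("__","_") pass
def pvRep : List Char → List Char
  | [] => []
  | c :: t => if c = '_' ∧ t.head? = some '_' then '_' :: pvRep t.tail else c :: pvRep t
termination_by t => t.length
decreasing_by all_goals simp [List.length_tail]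

-- collapse every run of '_' to a single '_' (the while loop's fixpoint)
def pvSqueeze : List Char → List Char
  | [] => []
  | c :: t => if c = '_' ∧ (pvSqueeze t).head? = some '_' then pvSqueeze t else c :: pvSqueeze t

-- what the squeezed mapped string looks like, computed from the source chars
def pvMid (g : Char → Char) : List Char → List Char
  | [] => []
  | c :: r => if PySem.Chars.isalnum c then g c :: pvMid g r
              else '_' :: pvMid g (r.dropWhile (fun d => !PySem.Chars.isalnum d))
termination_by l => l.length
decreasing_by
  · simp
  · simp; exact List.length_dropWhile_le _ _

-- B's tokenizer with an explicit current run
def pvTok (g : Char → Char) (cur : List Char) : List Char → List (List Char)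
  | [] => if cur = [] then [] else [cur]
  | c :: r => if PySem.Chars.isalnum c then pvTok g (cur ++ [g c]) r
              else if cur = [] then pvTok g [] r else cur :: pvTok g [] r

-- strip trailing '_', recursively
def pvRstrip : List Char → List Char
  | [] => []
  | c :: t => if pvRstrip t = [] ∧ c = '_' then [] else c :: pvRstrip t

theorem pvRep_length_le (t : List Char) : (pvRep t).length ≤ t.length := by
  fun_induction pvRep t with
  | case1 => simp
  | case2 c t h ih =>
    obtain ⟨hc, hh⟩ := h
    cases t with
    | nil => simp at hh
    | cons d t' => simp [List.tail] at *; omega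
  | case3 c t h ih => simp; omega

theorem pvRep_length_lt (t : List Char) (h : ['_', '_'] <:+: t) : (pvRep t).length < t.length := by
  fun_induction pvRep t with
  | case1 => simp at h
  | case2 c t hm ih =>
    obtain ⟨hc, hh⟩ := hm
    cases t with
    | nil => simp at hh
    | cons d t' =>
      have := pvRep_length_le t'
      simp [List.tail] at *
      omega
  | case3 c t hm ih =>
    rcases (List.infix_cons_iff.mp h) with hp | hi
    · exfalso
      apply hm
      rcases hp with ⟨u, hu⟩
      simp at hu
      obtain ⟨h1, h2⟩ := hu
      subst h1; subst h2
      simp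
    · have := ih hi
      simp
      omega

theorem pvSqueeze_head? (t : List Char) : (pvSqueeze t).head? = t.head? := by
  induction t with
  | nil => simp [pvSqueeze]
  | cons c t ih =>
    simp only [pvSqueeze]
    split
    · rename_i h; rw [h.2]; simp [h.1]
    · simp

theorem pvSqueeze_pvRep (t : List Char) : pvSqueeze (pvRep t) = pvSqueeze t := by
  fun_induction pvRep t with
  | case1 => rfl
  | case2 c t h ih =>
    obtain ⟨hc, hh⟩ := h
    cases t with
    | nil => simp at hh
    | cons d t' =>
      simp only [List.head?] at hh
      injection hh with hd
      subst hc; subst hd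
      simp only [List.tail] at *
      conv_rhs => rw [pvSqueeze]
      rw [pvSqueeze, ih]
      simp [pvSqueeze, pvSqueeze_head?]
      split
      · rename_i hh; rw [pvSqueeze_head?]; exact hh
      · simp
  | case3 c t h ih =>
    rw [pvSqueeze, pvSqueeze, ih]

theorem pvSqueeze_of_not_infix (t : List Char) (h : ¬ ['_', '_'] <:+: t) : pvSqueeze t = t := by
  induction t with
  | nil => rfl
  | cons c t ih =>
    have ht : ¬ ['_', '_'] <:+: t := fun hi => h (List.infix_cons_iff.mpr (Or.inr hi))
    rw [pvSqueeze, ih ht]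
    rw [if_neg]
    rintro ⟨hc, hh⟩
    apply h
    cases t with
    | nil => simp at hh
    | cons d t'' =>
      simp only [List.head?] at hh
      injection hh with hd
      subst hc; subst hd
      exact ⟨[], t'', by simp⟩

theorem pvGo_eq (fuel : Nat) (l acc : List Char) (h : l.length ≤ fuel) :
    PySem.Chars.replace.go ['_', '_'] ['_'] fuel l acc = acc.reverse ++ pvRep l := by
  induction fuel generalizing l acc with
  | zero =>
    have : l = [] := List.length_eq_zero_iff.mp (Nat.le_zero.mp h)
    subst this
    simp [PySem.Chars.replace.go, pvRep]
  | succ n ih =>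
    cases l with
    | nil => simp [PySem.Chars.replace.go, pvRep]
    | cons c t =>
      rw [PySem.Chars.replace.go]
      by_cases hp : List.isPrefixOf ['_', '_'] (c :: t)
      · rw [if_pos hp]
        have hp' := (List.isPrefixOf_iff_prefix.mp hp)
        rcases hp' with ⟨u, hu⟩
        simp at hu
        obtain ⟨h1, h2⟩ := hu
        subst h1
        rw [← h2] at *
        rw [ih]
        · rw [pvRep]
          simp
        · simp at h ⊢; omega
      · rw [if_neg hp]
        rw [ih]
        · rw [pvRep]
          rw [if_neg]
          · simp
          · rintro ⟨hc, hh⟩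
            apply hp
            cases t with
            | nil => simp at hh
            | cons d t'' =>
              simp only [List.head?] at hh
              injection hh with hd
              subst hc; subst hd
              simp [List.isPrefixOf]
        · simp at h ⊢; omega

theorem pvReplace_eq_pvRep (t : List Char) : PySem.Chars.replace t ['_', '_'] ['_'] = pvRep t := by
  rw [PySem.Chars.replace]
  simp [pvGo_eq t.length t [] (le_refl _)]

theorem pvCollapseLoop_eq (n : Nat) (t : List Char) (h : t.length ≤ n) : pvCollapseLoop n t = pvSqueeze t := by
  induction n generalizing t with
  | zero =>
    have : t = [] := List.length_eq_zero_iff.mp (Nat.le_zero.mp h)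
    subst this
    rw [pvCollapseLoop, pvSqueeze_of_not_infix]
    intro hi
    have := hi.length_le
    simp at this
  | succ n ih =>
    rw [pvCollapseLoop]
    by_cases hin : PySem.Chars.isIn ['_', '_'] t = true
    · rw [if_pos hin, pvReplace_eq_pvRep, ih]
      · exact pvSqueeze_pvRep t
      · have := pvRep_length_lt t ((PySem.Chars.isIn_iff_infix _ _).mp hin)
        omega
    · rw [if_neg hin, pvSqueeze_of_not_infix]
      exact fun hi => hin ((PySem.Chars.isIn_iff_infix _ _).mpr hi)

-- alnum chars never map to '_'
theorem pvUpper_ne (c : Char) (h : PySem.Chars.isalnum c = true) : PySem.Chars.upperChar c ≠ '_' := by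
  rw [PySem.Chars.upperChar]
  by_cases hl : PySem.Chars.islower c = true
  · rw [if_pos hl]
    simp [PySem.Chars.islower, Char.le_def] at hl
    have h1 : (97:Nat) ≤ c.toNat := by exact_mod_cast hl.1
    have h2 : c.toNat ≤ 122 := by exact_mod_cast hl.2
    intro heq
    have hv : (c.toNat - 32).isValidChar := Or.inl (by omega)
    have := congrArg Char.toNat heq
    rw [Char.toNat_ofNat, if_pos hv] at this
    rw [show ('_').toNat = 95 from rfl] at this
    omega
  · rw [if_neg hl]
    intro heq
    subst heq
    rw [show PySem.Chars.isalnum '_' = false from by decide] at h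
    exact absurd h (by simp)

theorem pvId_ne (c : Char) (h : PySem.Chars.isalnum c = true) : c ≠ '_' := by
  intro heq
  subst heq
  rw [show PySem.Chars.isalnum '_' = false from by decide] at h
  exact absurd h (by simp)

-- head of dropWhile (!isalnum) is alnum (or the remainder is empty)
theorem pvDw_head (cs : List Char) :
    cs.dropWhile (fun d => !PySem.Chars.isalnum d) = [] ∨
      ∃ d u, cs.dropWhile (fun d => !PySem.Chars.isalnum d) = d :: u ∧ PySem.Chars.isalnum d = true := by
  induction cs with
  | nil => exact Or.inl rfl
  | cons c r ih =>
    by_cases h : PySem.Chars.isalnum c = true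
    · exact Or.inr ⟨c, r, by simp [List.dropWhile, h], h⟩
    · simpa [List.dropWhile, h] using ih

theorem pvSqueeze_map (g : Char → Char) (hg : ∀ c, PySem.Chars.isalnum c = true → g c ≠ '_') :
    ∀ (n : Nat) (cs : List Char), cs.length ≤ n →
      pvSqueeze (cs.map (fun ch => if PySem.Chars.isalnum ch then g ch else '_')) = pvMid g cs := by
  intro n
  induction n with
  | zero =>
    intro cs h
    have : cs = [] := List.length_eq_zero_iff.mp (Nat.le_zero.mp h)
    subst this; simp [pvMid, pvSqueeze]
  | succ n ih =>
    intro cs h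
    cases cs with
    | nil => simp [pvMid, pvSqueeze]
    | cons c r =>
      by_cases hc : PySem.Chars.isalnum c = true
      · simp only [List.map, hc, if_pos, pvSqueeze, pvMid]
        rw [if_neg, ih r (by simp at h; omega)]
        rintro ⟨h1, _⟩
        exact hg c hc h1
      · simp only [List.map, hc, if_neg, Bool.false_eq_true, not_false_iff, pvMid, pvSqueeze]
        cases r with
        | nil => simp [pvSqueeze, pvMid]
        | cons d r' =>
          by_cases hd : PySem.Chars.isalnum d = true
          · rw [if_neg, ih (d :: r') (by simp at h ⊢; omega)]
            · simp [List.dropWhile, hd]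
            · rw [pvSqueeze_head?]
              simp [hd]
              intro he
              exact hg d hd he
          · rw [if_pos, ih (d :: r') (by simp at h ⊢; omega)]
            · conv_lhs => rw [pvMid]
              rw [if_neg (by simp [hd])]
              simp [List.dropWhile, hd]
            · rw [pvSqueeze_head?]
              simp [hd]

theorem pvMid_noLead (g : Char → Char) (hg : ∀ c, PySem.Chars.isalnum c = true → g c ≠ '_')
    (u : List Char) (hu : u = [] ∨ ∃ d u', u = d :: u' ∧ PySem.Chars.isalnum d = true) :
    (pvMid g u).dropWhile (fun c => c == '_') = pvMid g u := by
  rcases hu with rfl | ⟨d, u', rfl, hd⟩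
  · simp [pvMid]
  · rw [pvMid, if_pos hd]
    rw [List.dropWhile_cons_of_neg]
    simp [hg d hd]

theorem pvDrop_mid (g : Char → Char) (hg : ∀ c, PySem.Chars.isalnum c = true → g c ≠ '_')
    (cs : List Char) :
    (pvMid g cs).dropWhile (fun c => c == '_') = pvMid g (cs.dropWhile (fun d => !PySem.Chars.isalnum d)) := by
  cases cs with
  | nil => simp [pvMid]
  | cons c r =>
    by_cases hc : PySem.Chars.isalnum c = true
    · rw [List.dropWhile_cons_of_neg (by simp [hc])]
      rw [pvMid, if_pos hc]
      rw [List.dropWhile_cons_of_neg]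
      simp [hg c hc]
    · rw [pvMid, if_neg (by simp_all)]
      rw [List.dropWhile_cons_of_pos (by simp), List.dropWhile_cons_of_pos (by cases hx : PySem.Chars.isalnum c <;> simp_all)]
      exact pvMid_noLead g hg _ (pvDw_head r)

theorem pvTok_dw (g : Char → Char) (cs : List Char) :
    pvTok g [] cs = pvTok g [] (cs.dropWhile (fun d => !PySem.Chars.isalnum d)) := by
  induction cs with
  | nil => rfl
  | cons c r ih =>
    by_cases hc : PySem.Chars.isalnum c = true
    · rw [List.dropWhile_cons_of_neg (by simp [hc])]
    · rw [pvTok, if_neg (by simp [hc]), if_pos rfl, List.dropWhile_cons_of_pos (by simp [hc])]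
      exact ih

theorem pvTok_ne_nil (g : Char → Char) : ∀ (r cur : List Char), cur ≠ [] → pvTok g cur r ≠ [] := by
  intro r
  induction r with
  | nil => intro cur h; simp [pvTok, h]
  | cons c t ih =>
    intro cur h
    rw [pvTok]
    split
    · exact ih _ (by simp)
    · simp

theorem pvRstrip_eq (t : List Char) :
    (t.reverse.dropWhile (fun c => c == '_')).reverse = pvRstrip t := by
  induction t with
  | nil => rfl
  | cons c t ih =>
    rw [List.reverse_cons, List.dropWhile_append, pvRstrip]
    by_cases h : pvRstrip t = []
    · rw [h] at ih
      have he : (t.reverse.dropWhile (fun c => c == '_')) = [] := by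
        have := congrArg List.reverse ih
        simpa using this
      rw [he]
      simp only [List.isEmpty_nil]
      by_cases hc : c = '_'
      · simp [hc, h]
      · simp [hc, h]
    · have he : (t.reverse.dropWhile (fun c => c == '_')) ≠ [] := by
        intro he
        rw [he] at ih
        exact h (by simpa using ih.symm)
      rw [if_neg (by simpa [List.isEmpty_iff] using he)]
      rw [if_neg (by simp [h])]
      simp [ih]

theorem pvStripChars_eq (t : List Char) :
    PySem.Chars.stripChars t ['_'] = pvRstrip (t.dropWhile (fun c => c == '_')) := by
  rw [PySem.Chars.stripChars]
  have hp : (fun c => List.contains ['_'] c) = (fun c => c == '_') := by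
    funext c
    by_cases hc : c = '_' <;> simp [hc]
  rw [hp]
  exact pvRstrip_eq _

theorem pvJoinTok (g : Char → Char) (hg : ∀ c, PySem.Chars.isalnum c = true → g c ≠ '_') :
    ∀ (n : Nat) (r : List Char), r.length ≤ n → ∀ (cur : List Char), cur ≠ [] →
      PySem.Chars.join ['_'] (pvTok g cur r) = cur ++ pvRstrip (pvMid g r) := by
  intro n
  induction n with
  | zero =>
    intro r h cur hcur
    have : r = [] := List.length_eq_zero_iff.mp (Nat.le_zero.mp h)
    subst this
    rw [pvTok, if_neg hcur, PySem.Chars.join_singleton]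
    simp [pvMid, pvRstrip]
  | succ n ih =>
    intro r h cur hcur
    cases r with
    | nil =>
      rw [pvTok, if_neg hcur, PySem.Chars.join_singleton]
      simp [pvMid, pvRstrip]
    | cons c t =>
      by_cases hc : PySem.Chars.isalnum c = true
      · rw [pvTok, if_pos hc, ih t (by simp at h; omega) _ (by simp)]
        rw [pvMid, if_pos hc, pvRstrip, if_neg (by rintro ⟨_, h2⟩; exact hg c hc h2)]
        simp
      · rw [pvTok, if_neg hc, if_neg hcur]
        rw [pvMid, if_neg hc]
        rw [pvTok_dw]
        rcases pvDw_head t with hnil | ⟨d, u, hu, hd⟩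
        · rw [hnil, pvTok, if_pos rfl, PySem.Chars.join_singleton]
          simp [pvMid, pvRstrip]
        · rw [hu, pvTok, if_pos hd]
          simp only [List.nil_append]
          have hlen : u.length ≤ n := by
            have h1 : (d :: u).length ≤ t.length := hu ▸ List.length_dropWhile_le _ _
            simp at h h1
            omega
          have hne := pvTok_ne_nil g u [g d] (by simp)
          rcases hq : pvTok g [g d] u with _ | ⟨w, ws⟩
          · exact absurd hq hne
          · rw [PySem.Chars.join_cons_cons, ← hq]
            rw [ih u hlen [g d] (by simp)]
            rw [pvMid, if_pos hd]
            have hgd : pvRstrip (g d :: pvMid g u) = g d :: pvRstrip (pvMid g u) := by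
              rw [pvRstrip, if_neg (by rintro ⟨_, h2⟩; exact hg d hd h2)]
            rw [pvRstrip, if_neg (by rw [hgd]; rintro ⟨h1, _⟩; exact List.cons_ne_nil _ _ h1)]
            rw [hgd]
            simp

theorem pvMain (g : Char → Char) (hg : ∀ c, PySem.Chars.isalnum c = true → g c ≠ '_') (cs : List Char) :
    PySem.Chars.stripChars (pvSqueeze (cs.map (fun ch => if PySem.Chars.isalnum ch then g ch else '_'))) ['_']
      = PySem.Chars.join ['_'] (pvTok g [] cs) := by
  rw [pvStripChars_eq, pvSqueeze_map g hg cs.length cs (le_refl _), pvDrop_mid g hg]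
  rw [pvTok_dw]
  rcases pvDw_head cs with hnil | ⟨d, u, hu, hd⟩
  · rw [hnil]
    simp [pvMid, pvRstrip, pvTok, PySem.Chars.join_nil]
  · rw [hu, pvMid, if_pos hd, pvTok, if_pos hd]
    rw [List.nil_append, pvJoinTok g hg u.length u (le_refl _) [g d] (by simp)]
    rw [pvRstrip, if_neg (by rintro ⟨_, h2⟩; exact hg d hd h2)]
    simp

theorem pvFold (isLR : Bool) : ∀ (r : List Char) (ws : List (List Char)) (cur : List Char),
    (if (r.foldl (pvStep isLR) (ws, cur)).2.isEmpty then (r.foldl (pvStep isLR) (ws, cur)).1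
     else (r.foldl (pvStep isLR) (ws, cur)).1 ++ [(r.foldl (pvStep isLR) (ws, cur)).2])
      = ws ++ pvTok (fun ch => if isLR then ch else PySem.Chars.upperChar ch) cur r := by
  intro r
  induction r with
  | nil =>
    intro ws cur
    cases cur <;> simp [pvTok]
  | cons c t ih =>
    intro ws cur
    rw [List.foldl_cons]
    by_cases hc : PySem.Chars.isalnum c = true
    · rw [show pvStep isLR (ws, cur) c = (ws, cur ++ [if isLR then c else PySem.Chars.upperChar c]) from by simp [pvStep, hc]]
      rw [ih, pvTok, if_pos hc]
    · by_cases hcur : cur = []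
      · subst hcur
        rw [show pvStep isLR (ws, ([] : List Char)) c = (ws, []) from by simp [pvStep, hc]]
        rw [ih, pvTok, if_neg hc, if_pos rfl]
      · rw [show pvStep isLR (ws, cur) c = (ws ++ [cur], []) from by simp [pvStep, hc, hcur]]
        rw [ih, pvTok, if_neg hc, if_neg hcur]
        simp

-- ===== VERDICT (by name: the statement is the Claim_ definition above) =====
theorem profile_dir_name_py_spec : Claim_equal_profile_dir_name_py := by
  intro profile_id _
  unfold Spec_profile_dir_name_py profile_dir_name_py profile_dir_name_py_alt pvSanitizeToken
  simp only []
  by_cases hlr : PySem.Str.startswith (PySem.Str.upper (PySem.Str.strip profile_id)) "LR" = true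
  · rw [if_pos hlr, hlr]
    rw [PySem.List.foldl_append_singleton_eq_map]
    rw [List.nil_append]
    rw [pvCollapseLoop_eq _ _ (le_refl _)]
    rw [pvMain (fun ch => ch) pvId_ne]
    rw [pvFold]
    simp
  · rw [if_neg hlr, show PySem.Str.startswith (PySem.Str.upper (PySem.Str.strip profile_id)) "LR" = false from by simpa using hlr]
    rw [PySem.List.foldl_append_singleton_eq_map]
    rw [List.nil_append]
    rw [pvCollapseLoop_eq _ _ (le_refl _)]
    simp only [if_true]
    rw [pvMain PySem.Chars.upperChar pvUpper_ne]
    rw [pvFold]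
    simp
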